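-- pv_equiv track=rewrite | github.com/RainyDay22/numguesser | final.py | score2piece
-- ===== SOURCE A (Python) =====
-- def score2piece(scores):
--     tie = True
--     pieces = [0]*len(scores)
--
--     first = scores[0]
--
--     for i in range(len(scores)):
--         if (scores[i]!=first):tie = False #check tie
--
--         if (scores[i]>= 16): pieces[i]=3
--         elif (scores[i]>= 11): pieces[i]=2
--         elif (scores[i]>= 6): pieces[i]=1
--         elif (scores[i]>= 4): pieces[i]=-1
--         elif (scores[i]>= -1): pieces[i]=-2 #assign pieces value
--         else: pieces[i]=-3
--
--     lowest= min(scores)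
--     for i in range(len(scores)):
--         if scores[i]==lowest: pieces[i]=-3
--
--     if tie: pieces = [-1]*len(scores)
--     return pieces
-- ===== SOURCE B (Python) =====
-- def score2piece(scores):
--     # merge-scan: sort the distinct scores once, then sweep the threshold list
--     # a single time with a moving pointer, recording each distinct score's piece
--     # value in a dict; the minimum is the head of the sorted list, a one-value
--     # input is the tie case.
--     distinct = sorted(set(scores))
--     if len(distinct) <= 1:
--         return [-1] * len(scores)
--     thresholds = [-1, 4, 6, 11, 16]
--     values = [-3, -2, -1, 1, 2, 3]
--     table = {}
--     j = 0
--     for v in distinct: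
--         while j < len(thresholds) and thresholds[j] <= v:
--             j += 1
--         table[v] = values[j]
--     table[distinct[0]] = -3
--     return [table[s] for s in scores]
-- ===== Notes on version B (the rewrite author's own statement) =====
-- stated objective: alternative
-- what changed: Instead of A's two index-mutation passes (per-element six-way if/elif chain, then a min() scan overriding minima, then a tie flag), B sorts the distinct scores once and assigns piece values by a single two-pointer merge of the sorted distinct scores against the threshold list into a dict, takes the minimum as the head of the sorted list, detects the tie as a single distinct value, and maps each score through the dict.
import Mathlib
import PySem

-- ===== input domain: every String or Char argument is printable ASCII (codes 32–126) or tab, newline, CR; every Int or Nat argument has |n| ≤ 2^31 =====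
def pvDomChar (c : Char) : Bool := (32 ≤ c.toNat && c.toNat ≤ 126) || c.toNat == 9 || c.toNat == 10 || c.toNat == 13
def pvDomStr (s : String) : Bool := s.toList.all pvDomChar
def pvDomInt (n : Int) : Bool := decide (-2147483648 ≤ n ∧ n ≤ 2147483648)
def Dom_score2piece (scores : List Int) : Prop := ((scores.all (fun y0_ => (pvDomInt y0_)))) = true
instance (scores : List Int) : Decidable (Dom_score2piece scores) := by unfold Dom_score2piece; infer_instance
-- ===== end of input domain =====

-- B replaces A's two index-mutation passes by: sort the distinct scores, assign piece values
-- by a single two-pointer merge against the threshold list into a dict, minimum = head of the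
-- sorted list, tie = a single distinct value (alternative decomposition; same order of cost).

-- ===== PORT A =====
def score2piece (scores : List Int) : List Int :=
  match PySem.List.pyGet? scores 0 with
  | none => []   -- reading the first element raises IndexError on the empty list; excluded by Pre_
  | some first =>
    let st := (PySem.List.pyRange 0 (scores.length : Int) 1).foldl
      (fun (st : Bool × List Int) i =>
        ((if PySem.List.pyGetD scores i 0 ≠ first then false else st.1),
         (if PySem.List.pyGetD scores i 0 ≥ 16 then st.2.set i.toNat 3
          else if PySem.List.pyGetD scores i 0 ≥ 11 then st.2.set i.toNat 2
          else if PySem.List.pyGetD scores i 0 ≥ 6 then st.2.set i.toNat 1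
          else if PySem.List.pyGetD scores i 0 ≥ 4 then st.2.set i.toNat (-1)
          else if PySem.List.pyGetD scores i 0 ≥ -1 then st.2.set i.toNat (-2)
          else st.2.set i.toNat (-3))))  -- i is always in range here, so pyGetD/set are exact
      (true, List.replicate scores.length 0)
    let lowest := (PySem.List.min? scores (fun x => x)).getD 0  -- nonempty here: exact
    let pieces := (PySem.List.pyRange 0 (scores.length : Int) 1).foldl
      (fun (ps : List Int) i =>
        if PySem.List.pyGetD scores i 0 = lowest then ps.set i.toNat (-3) else ps)
      st.2
    if st.1 then List.replicate scores.length (-1) else pieces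

-- ===== PORT B =====
-- the inner 'while j < len(thresholds) and thresholds[j] <= v: j += 1' loop of Source B
def pvAdvance (ts : List Int) (v : Int) (j : Nat) : Nat :=
  if h : j < ts.length then
    if ts[j] ≤ v then pvAdvance ts v (j + 1) else j
  else j
termination_by ts.length - j

-- the body of Source B's 'for v in distinct' loop (state = (j, table))
def pvBStep (st : Nat × PySem.Dict Int Int) (v : Int) : Nat × PySem.Dict Int Int :=
  let j := pvAdvance [-1, 4, 6, 11, 16] v st.1
  (j, st.2.insert v (PySem.List.pyGetD [-3, -2, -1, 1, 2, 3] (j : Int) 0))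

def score2piece_alt (scores : List Int) : List Int :=
  let distinct := PySem.List.sorted (PySem.Set.ofList scores) (fun x => x) false
  if distinct.length ≤ 1 then
    List.replicate scores.length (-1)
  else
    let st := distinct.foldl pvBStep (0, PySem.Dict.empty)
    let table := st.2.insert (distinct.headD 0) (-3)   -- the first distinct element: nonempty here, exact
    scores.map (fun s => ((table.get? s).getD 0))      -- table[s]: key always present, exact

-- ===== PRECONDITION & SPEC =====
-- Pre_ excludes only the empty list, on which A raises IndexError reading the first element.
def Pre_score2piece (scores : List Int) : Prop := scores ≠ []
instance (scores : List Int) : Decidable (Pre_score2piece scores) := by unfold Pre_score2piece; infer_instance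
def pvWitness_score2piece : List Int := [5, 12, -3]

def Spec_score2piece (scores : List Int) (out : List Int) : Prop := out = score2piece_alt scores
instance (scores : List Int) (out : List Int) : Decidable (Spec_score2piece scores out) := by unfold Spec_score2piece; infer_instance

-- ===== CLAIM (what is proved, stated in full; the proofs are below) =====
def Claim_equal_score2piece : Prop := ∀ (scores : List Int), Dom_score2piece scores → Pre_score2piece scores → Spec_score2piece scores (score2piece scores)

-- ===== LEMMAS AND PROOFS =====

-- A's if/elif chain as a function of the score.
def pvClassify (s : Int) : Int :=
  if s ≥ 16 then 3 else if s ≥ 11 then 2 else if s ≥ 6 then 1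
  else if s ≥ 4 then -1 else if s ≥ -1 then -2 else -3

-- the number of thresholds in [-1,4,6,11,16] that are ≤ v (the merge pointer's final value)
def pvCnt (v : Int) : Nat :=
  if v < -1 then 0 else if v < 4 then 1 else if v < 6 then 2
  else if v < 11 then 3 else if v < 16 then 4 else 5

theorem pvValues_cnt (v : Int) :
    PySem.List.pyGetD [-3, -2, -1, 1, 2, 3] ((pvCnt v : Nat) : Int) 0 = pvClassify v := by
  unfold pvCnt pvClassify
  split_ifs <;> first | rfl | omega

theorem pvCnt_mono {v w : Int} (h : v ≤ w) : pvCnt v ≤ pvCnt w := by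
  unfold pvCnt; split_ifs <;> omega

theorem pvAdvance_five (v : Int) : pvAdvance [-1, 4, 6, 11, 16] v 5 = 5 := by
  rw [pvAdvance]; rfl

theorem pvAdvance_four (v : Int) :
    pvAdvance [-1, 4, 6, 11, 16] v 4 = if 16 ≤ v then 5 else 4 := by
  rw [pvAdvance]; simp [pvAdvance_five]

theorem pvAdvance_three (v : Int) :
    pvAdvance [-1, 4, 6, 11, 16] v 3 = if 16 ≤ v then 5 else if 11 ≤ v then 4 else 3 := by
  rw [pvAdvance]; simp [pvAdvance_four]
  split_ifs <;> first | rfl | omega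

theorem pvAdvance_two (v : Int) :
    pvAdvance [-1, 4, 6, 11, 16] v 2 =
      if 16 ≤ v then 5 else if 11 ≤ v then 4 else if 6 ≤ v then 3 else 2 := by
  rw [pvAdvance]; simp [pvAdvance_three]
  split_ifs <;> first | rfl | omega

theorem pvAdvance_one (v : Int) :
    pvAdvance [-1, 4, 6, 11, 16] v 1 =
      if 16 ≤ v then 5 else if 11 ≤ v then 4 else if 6 ≤ v then 3
      else if 4 ≤ v then 2 else 1 := by
  rw [pvAdvance]; simp [pvAdvance_two]
  split_ifs <;> first | rfl | omega

theorem pvAdvance_zero (v : Int) : pvAdvance [-1, 4, 6, 11, 16] v 0 = pvCnt v := by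
  rw [pvAdvance]; simp [pvAdvance_one]
  unfold pvCnt; split_ifs <;> first | rfl | omega

-- starting anywhere at or below the target count, the while loop stops exactly at pvCnt v
theorem pvAdvance_cnt (v : Int) (j : Nat) (hj : j ≤ pvCnt v) :
    pvAdvance [-1, 4, 6, 11, 16] v j = pvCnt v := by
  have h5 : pvCnt v ≤ 5 := by unfold pvCnt; split_ifs <;> omega
  have hj5 : j ≤ 5 := le_trans hj h5
  interval_cases j <;>
    simp only [pvAdvance_zero, pvAdvance_one, pvAdvance_two, pvAdvance_three,
      pvAdvance_four, pvAdvance_five] <;>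
    unfold pvCnt at * <;> split_ifs at * <;> omega

-- folding pvBStep over keys all different from s does not change the entry at s
theorem pvFold_get_ne (t : List Int) :
    ∀ (st : Nat × PySem.Dict Int Int) (s : Int), (∀ v ∈ t, v ≠ s) →
      ((t.foldl pvBStep st).2).get? s = st.2.get? s := by
  induction t with
  | nil => intro st s _; rfl
  | cons v t ih =>
    intro st s hne
    rw [List.foldl_cons, ih _ s (fun x hx => hne x (List.mem_cons_of_mem _ hx))]
    exact PySem.Dict.get?_insert_of_ne _ _ (Ne.symm (hne v List.mem_cons_self))

-- the merge fold records values[pvCnt s] at every key s of a strictly increasing list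
theorem pvFold_get (l : List Int) (hl : l.Pairwise (· < ·)) :
    ∀ (j : Nat) (d : PySem.Dict Int Int) (s : Int), s ∈ l → (∀ v ∈ l, j ≤ pvCnt v) →
      ((l.foldl pvBStep (j, d)).2).get? s
        = some (PySem.List.pyGetD [-3, -2, -1, 1, 2, 3] ((pvCnt s : Nat) : Int) 0) := by
  induction l with
  | nil => intro _ _ _ hs; cases hs
  | cons v t ih =>
    intro j d s hs hj
    have hvt : ∀ x ∈ t, v < x := (List.pairwise_cons.1 hl).1
    have hjv : j ≤ pvCnt v := hj v List.mem_cons_self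
    have hstep : pvBStep (j, d) v
        = (pvCnt v, d.insert v (PySem.List.pyGetD [-3, -2, -1, 1, 2, 3] ((pvCnt v : Nat) : Int) 0)) := by
      unfold pvBStep; rw [pvAdvance_cnt v j hjv]
    rw [List.foldl_cons, hstep]
    rcases List.mem_cons.1 hs with h | h
    · subst h
      rw [pvFold_get_ne t _ s (fun x hx => (ne_of_gt (hvt x hx)))]
      exact PySem.Dict.get?_insert_self _ _ _
    · exact ih (List.pairwise_cons.1 hl).2 _ _ s h
        (fun x hx => pvCnt_mono (le_of_lt (hvt x hx)))

-- a Nodup list whose elements are all equal has at most one element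
theorem pvNodup_all_eq {l : List Int} {a : Int} (hnd : l.Nodup)
    (h : ∀ x ∈ l, x = a) : l.length ≤ 1 := by
  match l with
  | [] => simp
  | [x] => simp
  | x :: y :: t =>
    exfalso
    have hx := h x List.mem_cons_self
    have hy := h y (List.mem_cons_of_mem _ List.mem_cons_self)
    have := (List.pairwise_cons.1 hnd).1 y (List.mem_cons_self)
    exact this (by rw [hx, hy])

-- a ≤1-length list containing a is exactly [a]
theorem pvLen_le_one {l : List Int} (hlen : l.length ≤ 1) {a : Int} (ha : a ∈ l) : l = [a] := by
  match l with
  | [] => cases ha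
  | [x] => simp at ha; rw [ha]
  | x :: y :: t => simp at hlen

-- A's tie flag holds iff the scores have a single distinct value
theorem pvTie_iff (scores : List Int) (first : Int) (hf : first ∈ scores) :
    (scores.all (fun s => s == first)) = true ↔
      (PySem.List.sorted (PySem.Set.ofList scores) (fun x => x) false).length ≤ 1 := by
  constructor
  · intro hall
    rw [PySem.List.length_sorted]
    exact pvNodup_all_eq (PySem.Set.nodup_ofList scores)
      (fun x hxm => beq_iff_eq.1
        (List.all_eq_true.1 hall x ((PySem.Set.mem_ofList scores x).1 hxm)))
  · intro hlen
    have hfd : first ∈ PySem.List.sorted (PySem.Set.ofList scores) (fun x => x) false :=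
      (PySem.List.mem_sorted _ _ _ _).2 ((PySem.Set.mem_ofList scores first).2 hf)
    have hone := pvLen_le_one hlen hfd
    refine List.all_eq_true.2 (fun x hx => beq_iff_eq.2 ?_)
    have hxd : x ∈ PySem.List.sorted (PySem.Set.ofList scores) (fun x => x) false :=
      (PySem.List.mem_sorted _ _ _ _).2 ((PySem.Set.mem_ofList scores x).2 hx)
    rw [hone] at hxd; simpa using hxd

-- the head of sorted(set(scores)) is the minimum of scores
theorem pvHead_min (scores : List Int) (m : Int) (t : List Int)
    (hD : PySem.List.sorted (PySem.Set.ofList scores) (fun x => x) false = m :: t) :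
    m ∈ scores ∧ ∀ y ∈ scores, m ≤ y := by
  constructor
  · have hm : m ∈ PySem.List.sorted (PySem.Set.ofList scores) (fun x => x) false :=
      hD ▸ List.mem_cons_self
    exact (PySem.Set.mem_ofList scores m).1 ((PySem.List.mem_sorted _ _ _ _).1 hm)
  · intro y hy
    exact PySem.List.key_head_sorted_le _ (fun x => x) hD y
      ((PySem.Set.mem_ofList scores y).2 hy)

-- A's first-loop tie flag equals "all elements equal first".
theorem pvLoop1_tie (xs : List Int) (first : Int) (k : Nat) (hk : k ≤ xs.length) :
    (PySem.List.pyRange 0 (k : Int) 1).foldl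
      (fun (t : Bool) i =>
        if PySem.List.pyGetD xs i 0 ≠ first then false else t) true
    = (xs.take k).all (fun s => s == first) := by
  induction k with
  | zero => simp [PySem.List.pyRange_one_eq_nil (le_refl 0)]
  | succ k ih =>
    have hlt : k < xs.length := hk
    rw [show ((k+1:Nat):Int) = (k:Int)+1 by push_cast; ring,
        PySem.List.pyRange_one_succ_right (by exact_mod_cast Nat.zero_le k),
        List.foldl_append, ih (Nat.le_of_succ_le hk)]
    simp only [List.foldl_cons, List.foldl_nil, PySem.List.pyGetD_natCast,
      List.getD_eq_getElem?_getD, List.getElem?_eq_getElem hlt, Option.getD_some,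
      List.take_add_one, List.all_append]
    by_cases h : xs[k] = first <;> simp [h]

-- A's first-loop piece writes: after the whole range, pieces = scores.map pvClassify.
theorem pvLoop1_pieces (xs : List Int) (k : Nat) (hk : k ≤ xs.length) :
    (PySem.List.pyRange 0 (k : Int) 1).foldl
      (fun (ps : List Int) i =>
        if PySem.List.pyGetD xs i 0 ≥ 16 then ps.set i.toNat 3
        else if PySem.List.pyGetD xs i 0 ≥ 11 then ps.set i.toNat 2
        else if PySem.List.pyGetD xs i 0 ≥ 6 then ps.set i.toNat 1
        else if PySem.List.pyGetD xs i 0 ≥ 4 then ps.set i.toNat (-1)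
        else if PySem.List.pyGetD xs i 0 ≥ -1 then ps.set i.toNat (-2)
        else ps.set i.toNat (-3))
      (List.replicate xs.length 0)
    = (xs.take k).map pvClassify ++ List.replicate (xs.length - k) 0 := by
  have hstep : ∀ (ps : List Int) (i : Int),
      (if PySem.List.pyGetD xs i 0 ≥ 16 then ps.set i.toNat 3
       else if PySem.List.pyGetD xs i 0 ≥ 11 then ps.set i.toNat 2
       else if PySem.List.pyGetD xs i 0 ≥ 6 then ps.set i.toNat 1
       else if PySem.List.pyGetD xs i 0 ≥ 4 then ps.set i.toNat (-1)
       else if PySem.List.pyGetD xs i 0 ≥ -1 then ps.set i.toNat (-2)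
       else ps.set i.toNat (-3))
      = ps.set i.toNat (pvClassify (PySem.List.pyGetD xs i 0)) := by
    intro ps i; unfold pvClassify; split_ifs <;> rfl
  simp only [hstep]
  induction k with
  | zero => simp [PySem.List.pyRange_one_eq_nil (le_refl 0)]
  | succ k ih =>
    have hlt : k < xs.length := hk
    rw [show ((k+1:Nat):Int) = (k:Int)+1 by push_cast; ring,
        PySem.List.pyRange_one_succ_right (by exact_mod_cast Nat.zero_le k),
        List.foldl_append, ih (Nat.le_of_succ_le hk)]
    simp only [List.foldl_cons, List.foldl_nil, PySem.List.pyGetD_natCast,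
      List.getD_eq_getElem?_getD, List.getElem?_eq_getElem hlt, Option.getD_some,
      Int.toNat_natCast]
    have hlen : ((xs.take k).map pvClassify).length = k := by
      simp [Nat.min_eq_left (Nat.le_of_succ_le hk)]
    rw [List.set_append_right _ _ (by omega), hlen]
    have hrep : xs.length - k = (xs.length - (k+1)) + 1 := by omega
    rw [hrep, List.replicate_succ, Nat.sub_self, List.set_cons_zero]
    simp
    have h2 : k < (List.map pvClassify xs).length := by simpa using hlt
    rw [List.take_add_one, List.getElem?_eq_getElem h2]
    simp

-- A's second loop overwrites lowest positions with -3 on top of map pvClassify.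
theorem pvLoop2 (xs : List Int) (lowest : Int) (k : Nat) (hk : k ≤ xs.length) :
    (PySem.List.pyRange 0 (k : Int) 1).foldl
      (fun (ps : List Int) i =>
        if PySem.List.pyGetD xs i 0 = lowest then ps.set i.toNat (-3) else ps)
      (xs.map pvClassify)
    = (xs.take k).map (fun s => if s = lowest then -3 else pvClassify s)
      ++ (xs.drop k).map pvClassify := by
  induction k with
  | zero => simp [PySem.List.pyRange_one_eq_nil (le_refl 0)]
  | succ k ih =>
    have hlt : k < xs.length := hk
    rw [show ((k+1:Nat):Int) = (k:Int)+1 by push_cast; ring,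
        PySem.List.pyRange_one_succ_right (by exact_mod_cast Nat.zero_le k),
        List.foldl_append, ih (Nat.le_of_succ_le hk)]
    simp only [List.foldl_cons, List.foldl_nil, PySem.List.pyGetD_natCast,
      List.getD_eq_getElem?_getD, List.getElem?_eq_getElem hlt, Option.getD_some,
      Int.toNat_natCast]
    have hlen : ((xs.take k).map (fun s => if s = lowest then -3 else pvClassify s)).length = k := by
      simp [Nat.min_eq_left (Nat.le_of_succ_le hk)]
    have hdrop : List.drop k xs = xs[k] :: List.drop (k+1) xs := List.drop_eq_getElem_cons hlt
    have htake : List.take (k+1) xs = List.take k xs ++ [xs[k]] := by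
      rw [List.take_add_one, List.getElem?_eq_getElem hlt]; rfl
    by_cases h : xs[k] = lowest
    · rw [if_pos h, List.set_append_right _ _ (by omega), hlen, Nat.sub_self, hdrop]
      simp [htake, h]
    · rw [if_neg h, hdrop, htake]
      have h2 : k < (List.map (fun s => if s = lowest then -3 else pvClassify s) xs).length := by
        simpa using hlt
      have h3 : k < (List.map pvClassify xs).length := by simpa using hlt
      simp
      rw [List.drop_eq_getElem_cons h3, List.take_add_one, List.getElem?_eq_getElem h2]
      simp [h]

-- ===== VERDICT (by name: the statement is the Claim_ definition above) =====
theorem score2piece_spec : Claim_equal_score2piece := by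
  intro scores _ hpre
  unfold Spec_score2piece score2piece score2piece_alt
  match hx : PySem.List.pyGet? scores 0 with
  | none =>
    exfalso
    cases scores with
    | nil => exact hpre rfl
    | cons x rest => rw [PySem.List.pyGet?_zero_cons] at hx; simp at hx
  | some first =>
    dsimp only
    -- first = head of scores
    have hfst : first ∈ scores := by
      cases scores with
      | nil => exact absurd rfl hpre
      | cons x rest =>
        rw [PySem.List.pyGet?_zero_cons] at hx
        simp at hx; subst hx; exact List.mem_cons_self
    rw [PySem.List.foldl_prod_mk
          (fun (t : Bool) i => if PySem.List.pyGetD scores i 0 ≠ first then false else t)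
          (fun (ps : List Int) i =>
            if PySem.List.pyGetD scores i 0 ≥ 16 then ps.set i.toNat 3
            else if PySem.List.pyGetD scores i 0 ≥ 11 then ps.set i.toNat 2
            else if PySem.List.pyGetD scores i 0 ≥ 6 then ps.set i.toNat 1
            else if PySem.List.pyGetD scores i 0 ≥ 4 then ps.set i.toNat (-1)
            else if PySem.List.pyGetD scores i 0 ≥ -1 then ps.set i.toNat (-2)
            else ps.set i.toNat (-3))]
    rw [pvLoop1_tie scores first scores.length (le_refl _),
        pvLoop1_pieces scores scores.length (le_refl _)]
    simp only [List.take_length, Nat.sub_self, List.replicate_zero, List.append_nil]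
    rw [pvLoop2 scores _ scores.length (le_refl _)]
    simp only [List.take_length, List.drop_length, List.map_nil, List.append_nil]
    by_cases htie : scores.all (fun s => s == first)
    · rw [if_pos htie, if_pos ((pvTie_iff scores first hfst).1 htie)]
    · have hgt : ¬ (PySem.List.sorted (PySem.Set.ofList scores) (fun x => x) false).length ≤ 1 :=
        fun h => htie ((pvTie_iff scores first hfst).2 h)
      rw [if_neg (by simpa using htie), if_neg hgt]
      match hD : PySem.List.sorted (PySem.Set.ofList scores) (fun x => x) false with
      | [] => rw [hD] at hgt; simp at hgt
      | m :: t =>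
        have hl : (m :: t).Pairwise (· < ·) := hD ▸ PySem.List.sorted_ofList_pairwise_lt scores
        have hmemD : ∀ x : Int, x ∈ (m :: t) ↔ x ∈ scores := by
          intro x; rw [← hD, PySem.List.mem_sorted, PySem.Set.mem_ofList]
        obtain ⟨hmmem, hmin⟩ := pvHead_min scores m t hD
        have hlow : (PySem.List.min? scores (fun x => x)).getD 0 = m := by
          match hmn : PySem.List.min? scores (fun x => x) with
          | none => exact absurd ((PySem.List.min?_eq_none_iff scores _).1 hmn) hpre
          | some w =>
            have hw1 : w ∈ scores := PySem.List.min?_mem hmn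
            have hw2 : ∀ y ∈ scores, w ≤ y := PySem.List.min?_isMin hmn
            simp only [Option.getD_some]
            exact le_antisymm (hw2 m hmmem) (hmin w hw1)
        have htab : ∀ s ∈ scores,
            (((((m :: t).foldl pvBStep (0, PySem.Dict.empty)).2).insert ((m :: t).headD 0) (-3)).get? s).getD 0
            = if s = m then -3 else pvClassify s := by
          intro s hs
          rw [List.headD_cons, PySem.Dict.get?_insert]
          by_cases hsm : s = m
          · simp [hsm]
          · rw [if_neg hsm,
              pvFold_get (m :: t) hl 0 PySem.Dict.empty s ((hmemD s).2 hs) (fun _ _ => Nat.zero_le _)]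
            simp only [Option.getD_some, pvValues_cnt]
            rw [if_neg hsm]
        rw [hlow]
        exact List.map_congr_left (fun s hs => (htab s hs).symm)
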